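-- pv_equiv track=rewrite | github.com/RobertDalton/Procesos_Estocasticos | funmejora.py | encontrarMinyPos
-- ===== SOURCE A (Python) =====
-- def encontrarMinyPos(lista):
--     ind = []
--     minimo = []
--     for x, indic in enumerate(lista):
--         ks = min(lista[x])
--         kd = lista[x].index(min(lista[x]))
--         ind.append(kd)
--         minimo.append(ks)
--
--     return minimo, ind
-- ===== SOURCE B (Python) =====
-- def encontrarMinyPos(lista):
--     def best(row):
--         bv, bi = row[0], 0
--         for i, v in enumerate(row[1:], 1):
--             if v < bv:
--                 bv, bi = v, i
--         return bv, bi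
--     pairs = [best(row) for row in lista]
--     return [p[0] for p in pairs], [p[1] for p in pairs]
-- ===== Notes on version B (the rewrite author's own statement) =====
-- stated objective: alternative
-- what changed: A scans each row three times with the min() builtin and .index(); B finds each row's minimum value and its first index in one explicit pass per row, collecting (value, index) pairs and unzipping them.
import Mathlib
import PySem

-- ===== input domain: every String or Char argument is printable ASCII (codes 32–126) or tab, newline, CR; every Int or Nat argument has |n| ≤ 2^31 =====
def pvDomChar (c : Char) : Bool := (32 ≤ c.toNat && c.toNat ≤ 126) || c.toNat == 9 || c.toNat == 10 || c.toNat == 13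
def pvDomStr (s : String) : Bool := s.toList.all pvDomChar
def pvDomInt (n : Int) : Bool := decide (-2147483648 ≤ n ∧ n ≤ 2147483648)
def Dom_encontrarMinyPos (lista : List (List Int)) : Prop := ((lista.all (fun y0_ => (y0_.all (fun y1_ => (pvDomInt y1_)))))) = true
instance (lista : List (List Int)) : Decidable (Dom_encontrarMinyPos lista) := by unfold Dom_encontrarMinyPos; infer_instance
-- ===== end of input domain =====

-- B replaces A's three scans per row (min(), min() again, .index()) by one explicit
-- first-minimum scan per row collecting (value, index) pairs, then unzips them.

-- ===== PORT A =====
-- literal port of A: for x, indic in enumerate(lista): ks = min(lista[x]); kd = lista[x].index(min(lista[x]));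
-- the `.getD` defaults are taken only where Python raises (min/[] on an empty row), excluded by Pre_.
def encontrarMinyPos (lista : List (List Int)) : List Int × List Int :=
  let st := (PySem.List.enumerate lista 0).foldl
    (fun (acc : List Int × List Int) xi =>
      let row := (PySem.List.pyGet? lista xi.1).getD []
      let ks := (PySem.List.min? row (fun y => y)).getD 0
      let kd := (PySem.List.index? row ((PySem.List.min? row (fun y => y)).getD 0)).getD 0
      (acc.1 ++ [(kd : Int)], acc.2 ++ [ks]))
    ([], [])
  (st.2, st.1)

-- ===== PORT B =====
-- helper `best(row)`: one pass, first strict minimum kept; row[0] raises on an empty row (excluded by Pre_).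
def pvBestRow (row : List Int) : Int × Int :=
  (PySem.List.enumerate (PySem.List.slice row (some 1) none) 1).foldl
    (fun b iv => if iv.2 < b.1 then (iv.2, iv.1) else b)
    ((PySem.List.pyGet? row 0).getD 0, 0)

def encontrarMinyPos_alt (lista : List (List Int)) : List Int × List Int :=
  let pairs := lista.map pvBestRow
  (pairs.map (fun p => p.1), pairs.map (fun p => p.2))

-- ===== PRECONDITION & SPEC =====
-- Pre_ excludes inputs containing an empty row: there Python A raises ValueError (min of
-- an empty sequence) and Python B raises IndexError (row[0]); neither returns a value.
def Pre_encontrarMinyPos (lista : List (List Int)) : Prop := ∀ row ∈ lista, row ≠ []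
instance (lista : List (List Int)) : Decidable (Pre_encontrarMinyPos lista) := by unfold Pre_encontrarMinyPos; infer_instance

def pvWitness_encontrarMinyPos : List (List Int) := [[3, 1, 2, 1], [5], [-2, 7]]

def Spec_encontrarMinyPos (lista : List (List Int)) (out : List Int × List Int) : Prop := out = encontrarMinyPos_alt lista
instance (lista : List (List Int)) (out : List Int × List Int) : Decidable (Spec_encontrarMinyPos lista out) := by unfold Spec_encontrarMinyPos; infer_instance

-- ===== CLAIM (what is proved, stated in full; the proofs are below) =====
def Claim_equal_encontrarMinyPos : Prop := ∀ (lista : List (List Int)), Dom_encontrarMinyPos lista → Pre_encontrarMinyPos lista → Spec_encontrarMinyPos lista (encontrarMinyPos lista)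

-- ===== LEMMAS AND PROOFS =====

-- invariant of B's one-pass scan: it computes the running minimum and the enumerate-index
-- of its FIRST occurrence (strict `<` never replaces an equal best).
lemma pvScanSpec (vs : List Int) : ∀ (y bi i : Int),
    (PySem.List.enumerate vs i).foldl
      (fun b iv => if iv.2 < b.1 then (iv.2, iv.1) else b) (y, bi)
    = (vs.foldl min y,
       if vs.foldl min y < y then
         i + (((PySem.List.index? vs (vs.foldl min y)).getD 0 : Nat) : Int)
       else bi) := by
  induction vs with
  | nil =>
    intro y bi i
    simp [PySem.List.enumerate_nil]
  | cons v vs ih =>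
    intro y bi i
    rw [PySem.List.enumerate_cons]
    simp only [List.foldl_cons]
    by_cases hvy : v < y
    · rw [if_pos hvy, ih v i (i + 1)]
      have hmv : min y v = v := min_eq_right hvy.le
      rw [hmv]
      have hle : vs.foldl min v ≤ v := (PySem.List.foldl_min_le vs v).1
      by_cases hlt : vs.foldl min v < v
      · have hmem : vs.foldl min v ∈ vs := by
          rcases PySem.List.foldl_min_mem vs v with h | h
          · omega
          · exact h
        obtain ⟨k, hk⟩ : ∃ k, PySem.List.index? vs (vs.foldl min v) = some k := by
          cases h : PySem.List.index? vs (vs.foldl min v) with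
          | none => exact absurd hmem ((PySem.List.index?_eq_none_iff vs _).mp h)
          | some k => exact ⟨k, rfl⟩
        have hne : v ≠ vs.foldl min v := by omega
        rw [if_pos hlt, if_pos (show vs.foldl min v < y by omega),
          PySem.List.index?_cons_of_ne vs hne, hk]
        simp only [Option.map_some, Option.getD_some, Prod.mk.injEq]
        refine ⟨trivial, ?_⟩
        push_cast
        omega
      · have heq : vs.foldl min v = v := by omega
        rw [if_neg hlt, heq, if_pos hvy, PySem.List.index?_cons_self]
        simp
    · rw [if_neg hvy, ih y bi (i + 1)]
      have hmv : min y v = y := min_eq_left (by omega)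
      rw [hmv]
      by_cases hlt : vs.foldl min y < y
      · have hmem : vs.foldl min y ∈ vs := by
          rcases PySem.List.foldl_min_mem vs y with h | h
          · omega
          · exact h
        obtain ⟨k, hk⟩ : ∃ k, PySem.List.index? vs (vs.foldl min y) = some k := by
          cases h : PySem.List.index? vs (vs.foldl min y) with
          | none => exact absurd hmem ((PySem.List.index?_eq_none_iff vs _).mp h)
          | some k => exact ⟨k, rfl⟩
        have hne : v ≠ vs.foldl min y := by omega
        rw [if_pos hlt, if_pos hlt, PySem.List.index?_cons_of_ne vs hne, hk]
        simp only [Option.map_some, Option.getD_some, Prod.mk.injEq]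
        refine ⟨trivial, ?_⟩
        push_cast
        omega
      · rw [if_neg hlt, if_neg hlt]

-- per-row agreement: B's single pass returns exactly (min(row), row.index(min(row)))
lemma pvRowEq (y : Int) (ys : List Int) :
    pvBestRow (y :: ys)
    = ((PySem.List.min? (y :: ys) (fun x => x)).getD 0,
       (((PySem.List.index? (y :: ys)
           ((PySem.List.min? (y :: ys) (fun x => x)).getD 0)).getD 0 : Nat) : Int)) := by
  have hmin := PySem.List.min?_id_cons y ys
  rw [hmin]
  simp only [Option.getD_some]
  unfold pvBestRow
  rw [PySem.List.slice_from_one]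
  simp only [List.tail_cons]
  have h0 : (PySem.List.pyGet? (y :: ys) 0).getD 0 = y := by simp
  rw [h0, pvScanSpec ys y 0 1]
  have hle : ys.foldl min y ≤ y := (PySem.List.foldl_min_le ys y).1
  by_cases hlt : ys.foldl min y < y
  · have hmem : ys.foldl min y ∈ ys := by
      rcases PySem.List.foldl_min_mem ys y with h | h
      · omega
      · exact h
    obtain ⟨k, hk⟩ : ∃ k, PySem.List.index? ys (ys.foldl min y) = some k := by
      cases h : PySem.List.index? ys (ys.foldl min y) with
      | none => exact absurd hmem ((PySem.List.index?_eq_none_iff ys _).mp h)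
      | some k => exact ⟨k, rfl⟩
    have hne : y ≠ ys.foldl min y := by omega
    rw [if_pos hlt, PySem.List.index?_cons_of_ne ys hne, hk]
    simp only [Option.map_some, Option.getD_some, Prod.mk.injEq]
    refine ⟨trivial, ?_⟩
    push_cast
    omega
  · have heq : ys.foldl min y = y := by omega
    rw [if_neg hlt, heq, PySem.List.index?_cons_self]
    simp

-- folding the two append-accumulators is mapping twice
lemma pvFoldPair (f g : List Int → Int) (l : List (List Int)) :
    ∀ (a b : List Int),
      l.foldl (fun (acc : List Int × List Int) row => (acc.1 ++ [g row], acc.2 ++ [f row])) (a, b)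
      = (a ++ l.map g, b ++ l.map f) := by
  induction l with
  | nil => intro a b; simp
  | cons r l ih =>
    intro a b
    simp only [List.foldl_cons, List.map_cons, ih]
    simp

-- inside the enumerate loop, lista[x] is the enumerated row itself
lemma pvLookupEq (lista : List (List Int)) (xi : Int × List Int)
    (hmem : xi ∈ PySem.List.enumerate lista 0) :
    (PySem.List.pyGet? lista xi.1).getD [] = xi.2 := by
  rcases (PySem.List.mem_enumerate_iff lista 0 xi).mp hmem with ⟨k, hk, hxi⟩
  subst hxi
  have hget : PySem.List.pyGet? lista ((k : Nat) : Int) = lista[k]? :=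
    PySem.List.pyGet?_natCast lista k
  simp [hget, List.getElem?_eq_getElem hk]

-- ===== VERDICT (by name: the statement is the Claim_ definition above) =====
theorem encontrarMinyPos_spec : Claim_equal_encontrarMinyPos := by
  intro lista _ hpre
  unfold Spec_encontrarMinyPos encontrarMinyPos encontrarMinyPos_alt
  have hbody :
      (PySem.List.enumerate lista 0).foldl
        (fun (acc : List Int × List Int) xi =>
          let row := (PySem.List.pyGet? lista xi.1).getD []
          let ks := (PySem.List.min? row (fun y => y)).getD 0
          let kd := (PySem.List.index? row ((PySem.List.min? row (fun y => y)).getD 0)).getD 0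
          (acc.1 ++ [(kd : Int)], acc.2 ++ [ks])) ([], [])
      = (PySem.List.enumerate lista 0).foldl
        (fun (acc : List Int × List Int) xi =>
          (acc.1 ++ [(((PySem.List.index? xi.2 ((PySem.List.min? xi.2 (fun y => y)).getD 0)).getD 0 : Nat) : Int)],
           acc.2 ++ [(PySem.List.min? xi.2 (fun y => y)).getD 0])) ([], []) := by
    apply List.foldl_ext
    intro acc xi hmem
    simp only [pvLookupEq lista xi hmem]
  rw [hbody]
  have hmap : (PySem.List.enumerate lista 0).foldl
        (fun (acc : List Int × List Int) xi =>
          (acc.1 ++ [(((PySem.List.index? xi.2 ((PySem.List.min? xi.2 (fun y => y)).getD 0)).getD 0 : Nat) : Int)],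
           acc.2 ++ [(PySem.List.min? xi.2 (fun y => y)).getD 0])) ([], [])
      = lista.foldl
        (fun (acc : List Int × List Int) row =>
          (acc.1 ++ [(((PySem.List.index? row ((PySem.List.min? row (fun y => y)).getD 0)).getD 0 : Nat) : Int)],
           acc.2 ++ [(PySem.List.min? row (fun y => y)).getD 0])) ([], []) := by
    conv_rhs => rw [← PySem.List.map_snd_enumerate lista 0]
    rw [List.foldl_map]
  rw [hmap, pvFoldPair
    (fun row => (PySem.List.min? row (fun y => y)).getD 0)
    (fun row => (((PySem.List.index? row ((PySem.List.min? row (fun y => y)).getD 0)).getD 0 : Nat) : Int))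
    lista [] []]
  simp only [List.nil_append, List.map_map, Prod.mk.injEq]
  constructor
  · apply List.map_congr_left
    intro row hrow
    cases row with
    | nil => exact absurd rfl (hpre [] hrow)
    | cons y ys => rw [Function.comp_apply, pvRowEq y ys]
  · apply List.map_congr_left
    intro row hrow
    cases row with
    | nil => exact absurd rfl (hpre [] hrow)
    | cons y ys => rw [Function.comp_apply, pvRowEq y ys]
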